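-- pv_equiv track=rewrite | github.com/cairdcoinheringaahing/Whispers | derivatives.py | bracketed
-- ===== SOURCE A (Python) =====
-- def bracketed(string, char):
--         inside = 0
--         for c in string:
--                 if c == '(':
--                         inside += 1
--                 if c == ')':
--                         inside -= 1
--                 if c == char:
--                         return bool(inside)
-- ===== SOURCE B (Python) =====
-- def bracketed(string, char):
--         try:
--                 idx = list(string).index(char)
--         except ValueError:
--                 return None
--         prefix = string[:idx + 1]
--         return bool(prefix.count('(') - prefix.count(')'))
-- ===== Notes on version B (the rewrite author's own statement) =====
-- stated objective: simpler
-- what changed: Replaces the single running-depth scan (a Python-level per-character loop maintaining a counter until char is met) by a find-then-count decomposition: locate the first occurrence with list(string).index(char), then derive the depth as '(' count minus ')' count over the inclusive prefix, using C-level str/list primitives.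
import Mathlib
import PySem

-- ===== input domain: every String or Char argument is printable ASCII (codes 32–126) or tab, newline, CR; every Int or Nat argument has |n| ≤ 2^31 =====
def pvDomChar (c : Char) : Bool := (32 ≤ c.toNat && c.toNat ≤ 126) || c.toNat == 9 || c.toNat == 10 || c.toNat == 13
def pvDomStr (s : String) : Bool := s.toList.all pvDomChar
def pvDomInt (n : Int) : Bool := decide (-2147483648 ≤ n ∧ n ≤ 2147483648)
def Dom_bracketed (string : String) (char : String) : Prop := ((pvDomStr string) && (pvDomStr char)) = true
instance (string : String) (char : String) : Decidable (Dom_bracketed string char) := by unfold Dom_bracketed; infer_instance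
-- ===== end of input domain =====

-- B replaces A's running-depth scan by find-the-first-occurrence then count '('/')' over the inclusive prefix (simpler decomposition, same cost).

-- ===== PORT A =====
-- the for-loop of A: the state is the running counter 'inside'; 'c == char' compares the 1-char string of c with char
def bracketedGo (char : String) : List Char → Int → Option Bool
  | [], _ => none
  | c :: rest, inside =>
    let inside1 := if c = '(' then inside + 1 else inside
    let inside2 := if c = ')' then inside1 - 1 else inside1
    if String.singleton c = char then some (decide (inside2 ≠ 0))
    else bracketedGo char rest inside2

def bracketed (string : String) (char : String) : Option Bool :=
  bracketedGo char string.toList 0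

-- ===== PORT B =====
-- list(string).index(char) with the ValueError caught = PySem.List.index? on the list of 1-char strings
def bracketed_alt (string : String) (char : String) : Option Bool :=
  match PySem.List.index? (string.toList.map String.singleton) char with
  | none => none
  | some idx =>
    let pfx := PySem.Str.slice string none (some ((idx : Int) + 1))
    some (decide (((PySem.Str.count pfx "(" : Int) - (PySem.Str.count pfx ")" : Int)) ≠ 0))

-- ===== PRECONDITION & SPEC =====
def Spec_bracketed (string : String) (char : String) (out : Option Bool) : Prop := out = bracketed_alt string char
instance (string : String) (char : String) (out : Option Bool) : Decidable (Spec_bracketed string char out) := by unfold Spec_bracketed; infer_instance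

-- ===== CLAIM (what is proved, stated in full; the proofs are below) =====
def Claim_equal_bracketed : Prop := ∀ (string : String) (char : String), Dom_bracketed string char → Spec_bracketed string char (bracketed string char)

-- ===== LEMMAS AND PROOFS =====

theorem decide_ne_zero_congr (a b : Int) (h : a = b) : decide (a ≠ 0) = decide (b ≠ 0) := by rw [h]

-- A's loop computes, at the first index i whose character maps to char,
-- bool(acc + #'(' − #')') over the inclusive prefix take (i+1)
theorem bracketedGo_eq_counts (char : String) (l : List Char) : ∀ (acc : Int),
    bracketedGo char l acc =
      match PySem.List.index? (l.map String.singleton) char with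
      | none => none
      | some i => some (decide (acc + ((l.take (i+1)).count '(' : Int)
                                    - ((l.take (i+1)).count ')' : Int) ≠ 0)) := by
  induction l with
  | nil => intro acc; simp [bracketedGo, PySem.List.index?]
  | cons c rest ih =>
    intro acc
    by_cases h : String.singleton c = char
    · rw [show (c :: rest).map String.singleton = String.singleton c :: rest.map String.singleton from rfl,
          h, PySem.List.index?_cons_self]
      simp only [bracketedGo, if_pos h]
      refine congrArg some (decide_ne_zero_congr _ _ ?_)
      simp only [List.take_succ_cons, List.take_zero, List.count_cons, List.count_nil]
      split_ifs with h1 h2 h2 <;> simp_all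
    · rw [show (c :: rest).map String.singleton = String.singleton c :: rest.map String.singleton from rfl,
          PySem.List.index?_cons_of_ne _ h]
      simp only [bracketedGo, if_neg h]
      rw [ih]
      cases hidx : PySem.List.index? (rest.map String.singleton) char with
      | none => simp
      | some i =>
        simp only [Option.map_some]
        refine congrArg some (decide_ne_zero_congr _ _ ?_)
        simp only [List.take_succ_cons, List.count_cons]
        split_ifs with h1 h2 h2 <;> simp_all <;> omega

-- Chars.count.go with a single-character needle and enough fuel is List.count
theorem go_singleton (c : Char) : ∀ (fuel : ℕ) (l : List Char) (acc : ℕ), l.length ≤ fuel →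
    PySem.Chars.count.go [c] fuel l acc = acc + l.count c := by
  intro fuel
  induction fuel with
  | zero =>
    intro l acc h
    have : l = [] := List.eq_nil_of_length_eq_zero (Nat.le_zero.mp h)
    subst this; simp [PySem.Chars.count.go]
  | succ n ih =>
    intro l acc h
    cases l with
    | nil => simp [PySem.Chars.count.go]
    | cons a t =>
      rw [PySem.Chars.count.go]
      by_cases hp : List.isPrefixOf [c] (a :: t) = true
      · have hac : c = a := by simpa [List.isPrefixOf] using hp
        subst hac
        rw [if_pos hp]
        simp only [List.length_cons, List.drop_succ_cons, List.length_nil, List.drop_zero,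
          List.count_cons_self]
        rw [ih t (acc + 1) (by simpa using h)]
        omega
      · have hac : ¬ (a = c) := by simp [List.isPrefixOf] at hp; exact fun h' => hp h'.symm
        rw [if_neg hp, ih t acc (by simpa using h)]
        simp [hac]

-- Python str.count with a single-character needle is character count
theorem str_count_singleton (s : String) (c : Char) :
    PySem.Str.count s (String.singleton c) = s.toList.count c := by
  have h1 : (String.singleton c).toList = [c] := by simp [String.singleton]
  rw [PySem.Str.count_eq, h1]
  unfold PySem.Chars.count
  rw [if_neg (by simp)]
  rw [go_singleton c s.toList.length s.toList 0 le_rfl]; omega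

-- string[:i+1] is take (i+1) on the character list
theorem pfx_toList (s : String) (i : ℕ) :
    (PySem.Str.slice s none (some ((i : Int) + 1))).toList = s.toList.take (i + 1) := by
  rw [PySem.Str.toList_slice, PySem.Chars.slice_eq_listSlice]
  have : ((i : Int) + 1) = ((i + 1 : ℕ) : Int) := by push_cast; ring
  rw [this, PySem.List.slice_to_natCast]

-- ===== VERDICT (by name: the statement is the Claim_ definition above) =====
theorem bracketed_spec : Claim_equal_bracketed := by
  intro string char _
  unfold Spec_bracketed bracketed bracketed_alt
  rw [bracketedGo_eq_counts]
  cases hidx : PySem.List.index? (string.toList.map String.singleton) char with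
  | none => rfl
  | some i =>
    refine congrArg some (decide_ne_zero_congr _ _ ?_)
    have h2 : ("(" : String) = String.singleton '(' := rfl
    have h3 : (")" : String) = String.singleton ')' := rfl
    rw [h2, h3, str_count_singleton, str_count_singleton, pfx_toList]
    omega
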